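-- pv_equiv track=rewrite | github.com/Krivcova-VA/basics_of_programming | упражнение 3/дз_осн.кодинга_3.py | F
-- ===== SOURCE A (Python) =====
-- def F(n,m,k):
--     for i in range(m,0,-1):
--         if n * i == k:
--             return "Да"
--         else:
--             continue
--     else:
--         for i in range(n,0,-1):
--             if m * i == k:
--                 return "Да"
--             else:
--                 continue
--     return "Нет"
-- ===== SOURCE B (Python) =====
-- def F(n, m, k):
--     # O(1) divisibility check instead of scanning both ranges.
--     if k == 0:
--         return "Да" if (n == 0 and m >= 1) or (m == 0 and n >= 1) else "Нет"
--     if n != 0 and k % n == 0 and 1 <= k // n <= m: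
--         return "Да"
--     if m != 0 and k % m == 0 and 1 <= k // m <= n:
--         return "Да"
--     return "Нет"
-- ===== Notes on version B (the rewrite author's own statement) =====
-- stated objective: faster
-- what changed: Replaced A's two linear countdown scans (range(m,0,-1) and range(n,0,-1)) by a constant-time divisibility test: k is n*i for some 1<=i<=m iff n divides k and k//n lies in [1,m], with the k==0 / zero-factor corner handled explicitly.
import Mathlib
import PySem

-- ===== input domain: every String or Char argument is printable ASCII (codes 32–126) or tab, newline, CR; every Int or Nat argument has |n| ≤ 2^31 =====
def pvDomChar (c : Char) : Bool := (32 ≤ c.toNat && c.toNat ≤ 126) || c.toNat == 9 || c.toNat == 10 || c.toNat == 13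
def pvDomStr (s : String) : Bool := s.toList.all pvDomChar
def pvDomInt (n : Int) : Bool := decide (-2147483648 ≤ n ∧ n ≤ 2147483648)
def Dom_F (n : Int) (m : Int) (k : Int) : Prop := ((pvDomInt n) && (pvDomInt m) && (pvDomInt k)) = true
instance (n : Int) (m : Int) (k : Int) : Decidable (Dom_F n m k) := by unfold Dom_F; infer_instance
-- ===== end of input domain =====

-- B replaces A's two linear scans by an O(1) divisibility test; the equivalence is exact on all ints.

-- ===== PORT A =====
-- the 'for … return' loop: scan the range list, return "Да" on the first hit
def loopF (c : Int) (k : Int) : List Int → Option String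
  | [] => none
  | i :: rest => if c * i = k then some "Да" else loopF c k rest

def F (n : Int) (m : Int) (k : Int) : String :=
  match loopF n k (PySem.List.pyRange m 0 (-1)) with
  | some s => s
  | none =>
    match loopF m k (PySem.List.pyRange n 0 (-1)) with
    | some s => s
    | none => "Нет"

-- ===== PORT B =====
def F_alt (n : Int) (m : Int) (k : Int) : String :=
  if k = 0 then
    if (n = 0 ∧ 1 ≤ m) ∨ (m = 0 ∧ 1 ≤ n) then "Да" else "Нет"
  else if n ≠ 0 ∧ PySem.Int.mod k n = 0 ∧ 1 ≤ PySem.Int.floordiv k n ∧ PySem.Int.floordiv k n ≤ m then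
    "Да"
  else if m ≠ 0 ∧ PySem.Int.mod k m = 0 ∧ 1 ≤ PySem.Int.floordiv k m ∧ PySem.Int.floordiv k m ≤ n then
    "Да"
  else "Нет"

-- ===== PRECONDITION & SPEC =====
def Spec_F (n : Int) (m : Int) (k : Int) (out : String) : Prop := out = F_alt n m k
instance (n : Int) (m : Int) (k : Int) (out : String) : Decidable (Spec_F n m k out) := by unfold Spec_F; infer_instance

-- ===== CLAIM (what is proved, stated in full; the proofs are below) =====
def Claim_equal_F : Prop := ∀ (n : Int) (m : Int) (k : Int), Dom_F n m k → Spec_F n m k (F n m k)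

-- ===== LEMMAS AND PROOFS =====

-- the scan returns "Да" exactly when some list element i satisfies c*i = k
theorem loopF_eq (c k : Int) (l : List Int) :
    loopF c k l = if ∃ i ∈ l, c * i = k then some "Да" else none := by
  induction l with
  | nil => simp [loopF]
  | cons a t ih =>
    by_cases h : c * a = k
    · have hx : ∃ i ∈ a :: t, c * i = k := ⟨a, List.mem_cons_self, h⟩
      rw [if_pos hx]
      simp [loopF, h]
    · have he : (∃ i ∈ a :: t, c * i = k) ↔ (∃ i ∈ t, c * i = k) := by
        constructor
        · rintro ⟨i, hi, hik⟩
          rcases List.mem_cons.mp hi with rfl | hi'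
          · exact absurd hik h
          · exact ⟨i, hi', hik⟩
        · rintro ⟨i, hi, hik⟩
          exact ⟨i, List.mem_cons_of_mem a hi, hik⟩
      simp only [loopF, if_neg h, ih, he]

-- the scan's hit condition as a divisibility condition
theorem hit_iff (c b k : Int) :
    (∃ i ∈ PySem.List.pyRange b 0 (-1), c * i = k) ↔
      (if c = 0 then k = 0 ∧ 1 ≤ b
       else PySem.Int.mod k c = 0 ∧ 1 ≤ PySem.Int.floordiv k c ∧ PySem.Int.floordiv k c ≤ b) := by
  simp only [PySem.List.mem_pyRange_neg_one]
  by_cases hc : c = 0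
  · subst hc
    simp only [zero_mul, if_pos rfl, eq_self_iff_true, ite_true]
    constructor
    · rintro ⟨i, ⟨h1, h2⟩, h3⟩; exact ⟨h3.symm, by omega⟩
    · rintro ⟨hk, hb⟩; exact ⟨1, ⟨by omega, hb⟩, hk.symm⟩
  · rw [if_neg hc]
    constructor
    · rintro ⟨i, ⟨h1, h2⟩, h3⟩
      have hdvd : PySem.Int.mod k c = 0 := (PySem.Int.mod_eq_zero_iff_dvd k c).mpr ⟨i, h3.symm⟩
      have hq := PySem.Int.floordiv_mul_add_mod k c
      rw [hdvd, add_zero] at hq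
      have hfi : PySem.Int.floordiv k c = i := by
        have : PySem.Int.floordiv k c * c = i * c := by rw [hq, ← h3]; ring
        exact mul_right_cancel₀ hc this
      rw [hfi]; exact ⟨hdvd, h1, h2⟩
    · rintro ⟨hm, h1, h2⟩
      refine ⟨PySem.Int.floordiv k c, ⟨by omega, h2⟩, ?_⟩
      have hq := PySem.Int.floordiv_mul_add_mod k c
      rw [hm, add_zero] at hq
      linarith [hq, mul_comm (PySem.Int.floordiv k c) c]

theorem floordiv_zero_left (c : Int) : PySem.Int.floordiv 0 c = 0 := by
  have hm0 : PySem.Int.mod 0 c = 0 := (PySem.Int.mod_eq_zero_iff_dvd 0 c).mpr ⟨0, by ring⟩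
  have hq := PySem.Int.floordiv_mul_add_mod 0 c
  rw [hm0, add_zero] at hq
  by_cases hc : c = 0
  · subst hc; decide
  · exact (mul_eq_zero.mp hq).resolve_right hc

theorem mod_zero_left (c : Int) : PySem.Int.mod 0 c = 0 :=
  (PySem.Int.mod_eq_zero_iff_dvd 0 c).mpr ⟨0, by ring⟩

-- ===== VERDICT (by name: the statement is the Claim_ definition above) =====
theorem F_spec : Claim_equal_F := by
  intro n m k _
  unfold Spec_F F F_alt
  rw [loopF_eq, loopF_eq]
  simp only [hit_iff]
  by_cases hk : k = 0
  · subst hk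
    by_cases hn : n = 0 <;> by_cases hm : m = 0 <;>
      simp only [hn, hm, if_pos, ite_false, floordiv_zero_left, mod_zero_left] <;>
      split_ifs <;> first | rfl | omega | tauto
  · by_cases hn : n = 0 <;> by_cases hm : m = 0 <;>
      simp only [hn, hm, ite_true, ite_false] <;>
      split_ifs <;> first | rfl | omega | tauto
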